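-- pv_equiv track=rewrite | github.com/ezraschwaa/wordle_annihilator | wordle_guesser.py | contains_yellows_check
-- ===== SOURCE A (Python) =====
-- def yellow_letters_count(possibles):
-- 	yellow_letters = 0
-- 	for i in possibles:
-- 		if(i!='_'):
-- 			yellow_letters +=1
-- 		else:
-- 			continue
-- 	return yellow_letters
--
-- def contains_yellows_check(possibles, word_list):
-- 	end_words = []
-- 	temp_count = 0
-- 	yellow_count = yellow_letters_count(possibles)
-- 	for item in word_list:
-- 		temp_count = 0
-- 		for i in range(len(item)):
-- 			for letter in possibles:
-- 				if(letter == '_'):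
-- 					continue
-- 				elif(letter == item[i]):
-- 				#This creates a bug! in the case of repeating letters.
-- 					temp_count+=1
-- 		if(temp_count>=yellow_count):
-- 			end_words.append(item)
-- 	return end_words
-- ===== SOURCE B (Python) =====
-- def contains_yellows_check(possibles, word_list):
-- 	end_words = []
-- 	yellows = [p for p in possibles if p != '_']
-- 	for word in word_list:
-- 		wc = {}
-- 		for ch in word:
-- 			wc[ch] = wc.get(ch, 0) + 1
-- 		if sum(wc.get(c, 0) for c in yellows) >= len(yellows):
-- 			end_words.append(word)
-- 	return end_words
-- ===== Notes on version B (the rewrite author's own statement) =====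
-- stated objective: faster
-- what changed: A counts matches with a per-position-by-per-yellow-letter double loop inside each word; B builds one character-frequency dict per word and sums the lookups of the pre-filtered yellow letters against a precomputed threshold.
import Mathlib
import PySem

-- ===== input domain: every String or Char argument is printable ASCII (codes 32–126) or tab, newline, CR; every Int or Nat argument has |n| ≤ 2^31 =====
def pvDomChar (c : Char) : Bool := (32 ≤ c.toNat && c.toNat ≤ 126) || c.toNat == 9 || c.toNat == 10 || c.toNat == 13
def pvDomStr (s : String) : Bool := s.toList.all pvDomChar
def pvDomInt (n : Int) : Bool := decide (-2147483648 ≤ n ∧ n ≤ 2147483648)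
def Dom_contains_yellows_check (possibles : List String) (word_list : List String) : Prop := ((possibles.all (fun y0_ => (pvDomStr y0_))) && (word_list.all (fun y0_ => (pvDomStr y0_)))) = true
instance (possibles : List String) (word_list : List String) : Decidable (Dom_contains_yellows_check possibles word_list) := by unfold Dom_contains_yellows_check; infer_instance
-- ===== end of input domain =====

-- B replaces A's per-word position × yellow-letter double loop by one character-frequency
-- table per word summed over the filtered yellow letters (objective: faster per-word pass).

-- ===== PORT A =====
def yellow_letters_count (possibles : List String) : Int :=
  possibles.foldl (fun yellow_letters i => if i != "_" then yellow_letters + 1 else yellow_letters) 0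

def contains_yellows_check (possibles : List String) (word_list : List String) : List String :=
  let yellow_count := yellow_letters_count possibles
  word_list.foldl (fun end_words item =>
    let temp_count : Int :=
      (PySem.List.pyRange 0 (PySem.Str.len item) 1).foldl (fun tc i =>
        possibles.foldl (fun tc letter =>
          if letter == "_" then tc
          else if some letter == (PySem.Str.pyGet? item i).map (fun c => String.ofList [c]) then tc + 1
          else tc) tc) 0
    if temp_count ≥ yellow_count then end_words ++ [item] else end_words) []

-- ===== PORT B =====
def contains_yellows_check_alt (possibles : List String) (word_list : List String) : List String :=
  let yellows := possibles.filter (fun p => p != "_")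
  word_list.foldl (fun end_words word =>
    let wc := word.toList.foldl
      (fun d ch => d.insert (String.ofList [ch]) (d.getD (String.ofList [ch]) 0 + 1))
      (PySem.Dict.empty : PySem.Dict String Int)
    if (yellows.map (fun c => wc.getD c 0)).sum ≥ (yellows.length : Int)
    then end_words ++ [word] else end_words) []

-- ===== PRECONDITION & SPEC =====
def Spec_contains_yellows_check (possibles : List String) (word_list : List String) (out : List String) : Prop := out = contains_yellows_check_alt possibles word_list
instance (possibles : List String) (word_list : List String) (out : List String) : Decidable (Spec_contains_yellows_check possibles word_list out) := by unfold Spec_contains_yellows_check; infer_instance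

-- ===== CLAIM (what is proved, stated in full; the proofs are below) =====
def Claim_equal_contains_yellows_check : Prop := ∀ (possibles : List String) (word_list : List String), Dom_contains_yellows_check possibles word_list → Spec_contains_yellows_check possibles word_list (contains_yellows_check possibles word_list)

-- ===== LEMMAS AND PROOFS =====

-- double sums over two lists commute
lemma sum_swap {α β : Type} (xs : List α) (ys : List β) (f : α → β → Int) :
    (xs.map (fun a => (ys.map (f a)).sum)).sum = (ys.map (fun b => (xs.map (fun a => f a b)).sum)).sum := by
  induction xs with
  | nil => simp
  | cons a t ih =>
      simp only [List.map_cons, List.sum_cons, ih,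
        PySem.List.sum_map_add_int ys (f a) (fun b => (t.map (fun a => f a b)).sum)]

lemma map_range_getD {α : Type} (xs : List α) (d : α) :
    (List.range xs.length).map (fun k => xs.getD k d) = xs := by
  apply List.ext_getElem
  · simp
  · intro i h1 h2; simp [List.getD_eq_getElem?_getD, List.getElem?_eq_getElem h2]

lemma sum_filter {α : Type} (l : List α) (p : α → Bool) (f : α → Int) :
    (l.map (fun x => if p x then f x else 0)).sum = ((l.filter p).map f).sum := by
  induction l with
  | nil => rfl
  | cons a t ih => by_cases h : p a <;> simp [h, ih]

-- one yellow letter's contribution, summed over the positions of s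
lemma per_letter (s : String) (letter : String) :
    ((List.range s.toList.length).map (fun (k : Nat) =>
      if (!(letter == "_") && (some letter == (PySem.Str.pyGet? s ((k : Nat) : Int)).map (fun c => String.ofList [c])))
      then (1:Int) else 0)).sum
    = if letter != "_" then (((s.toList.map (fun ch => String.ofList [ch])).count letter : Nat) : Int) else 0 := by
  by_cases h : letter == "_"
  · rcases eq_of_beq h
    simp
  · simp only [h, Bool.not_false, Bool.true_and, bne, if_true]
    have hmap : (List.range s.toList.length).map (fun (k : Nat) =>
        if (some letter == (PySem.Str.pyGet? s ((k : Nat) : Int)).map (fun c => String.ofList [c]))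
        then (1:Int) else 0)
        = (List.range s.toList.length).map (fun (k : Nat) =>
          if letter == String.ofList [s.toList.getD k 'a'] then (1:Int) else 0) := by
      apply List.map_congr_left
      intro k hk
      rw [List.mem_range] at hk
      rw [PySem.Str.pyGet?_natCast, List.getElem?_eq_getElem hk, List.getD_eq_getElem _ _ hk]
      simp
    rw [hmap]
    have hmm : (List.range s.toList.length).map (fun (k : Nat) =>
          if letter == String.ofList [s.toList.getD k 'a'] then (1:Int) else 0)
        = ((List.range s.toList.length).map (fun k => s.toList.getD k 'a')).map
            (fun c => if letter == String.ofList [c] then (1:Int) else 0) := by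
      rw [List.map_map]; rfl
    rw [hmm, map_range_getD, PySem.List.sum_map_ite_one_zero]
    congr 1
    rw [List.count_eq_countP, List.countP_map]
    apply List.countP_congr
    intro c _
    simp only [Function.comp_def, beq_iff_eq]
    exact eq_comm

-- A's per-word triple loop equals B's frequency sum
lemma temp_eq (possibles : List String) (s : String) :
    (PySem.List.pyRange 0 (PySem.Str.len s) 1).foldl (fun tc i =>
        possibles.foldl (fun tc letter =>
          if letter == "_" then tc
          else if some letter == (PySem.Str.pyGet? s i).map (fun c => String.ofList [c]) then tc + 1
          else tc) tc) 0
    = ((possibles.filter (fun p => p != "_")).map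
        (fun c => (((s.toList.map (fun ch => String.ofList [ch])).count c : Nat) : Int))).sum := by
  have hstep : ∀ (tc : Int) (i : Int),
      possibles.foldl (fun tc letter =>
          if letter == "_" then tc
          else if some letter == (PySem.Str.pyGet? s i).map (fun c => String.ofList [c]) then tc + 1
          else tc) tc
      = tc + ((List.countP (fun letter => !(letter == "_") &&
          (some letter == (PySem.Str.pyGet? s i).map (fun c => String.ofList [c]))) possibles : Nat) : Int) := by
    intro tc i
    rw [← PySem.List.foldl_count_if]
    congr 1
    funext acc letter
    by_cases h : letter == "_" <;> simp [h]
  simp only [hstep]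
  rw [PySem.List.foldl_add, PySem.Str.len_eq, PySem.List.pyRange_zero_natCast, List.map_map,
    zero_add]
  simp only [Function.comp_def, ← PySem.List.sum_map_ite_one_zero]
  rw [sum_swap]
  rw [← sum_filter possibles (fun p => p != "_")
    (fun c => (((s.toList.map (fun ch => String.ofList [ch])).count c : Nat) : Int))]
  congr 1
  apply List.map_congr_left
  intro letter _
  exact per_letter s letter

lemma ylc_eq (possibles : List String) :
    yellow_letters_count possibles = ((possibles.filter (fun p => p != "_")).length : Int) := by
  unfold yellow_letters_count
  rw [PySem.List.foldl_count_if (fun i => i != "_") possibles 0, List.countP_eq_length_filter]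
  simp

-- ===== VERDICT (by name: the statement is the Claim_ definition above) =====
theorem contains_yellows_check_spec : Claim_equal_contains_yellows_check := by
  intro possibles word_list _
  unfold Spec_contains_yellows_check contains_yellows_check contains_yellows_check_alt
  simp only []
  congr 1
  funext end_words word
  rw [temp_eq, ylc_eq]
  rw [show word.toList.foldl
        (fun d ch => d.insert (String.ofList [ch]) (d.getD (String.ofList [ch]) 0 + 1))
        (PySem.Dict.empty : PySem.Dict String Int)
      = PySem.Dict.counter (word.toList.map (fun ch => String.ofList [ch])) from by
    rw [← PySem.Dict.foldl_insert_getD_add_one_eq_counter, List.foldl_map]]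
  simp only [PySem.Dict.getD_counter]
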